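-- pv_equiv track=rewrite | github.com/sathishsravanakumar/Halo-Trace | backend/main.py | basic_extract_names
-- ===== SOURCE A (Python) =====
-- from typing import List, Optional
--
-- def basic_extract_names(text: str) -> List[str]:
--     """Basic name extraction without AI."""
--     if not text:
--         return []
--
--     lines = text.split('\n')
--     names = []
--
--     for line in lines:
--         line = line.strip()
--         if len(line) < 2 or len(line) > 100:
--             continue
--         if all(c.isdigit() or c.isspace() or not c.isalnum() for c in line):
--             continue
--         if len(line.split()) > 6:
--             continue
--         names.append(line)
--
--     seen = set()
--     unique_names = []
--     for name in names:
--         if name.lower() not in seen: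
--             seen.add(name.lower())
--             unique_names.append(name)
--
--     return unique_names[:20]
-- ===== SOURCE B (Python) =====
-- from typing import List
--
--
-- def basic_extract_names(text: str) -> List[str]:
--     """One pass, no auxiliary set: dedup by scanning the (≤20) collected names
--     case-insensitively, stopping as soon as 20 names are collected."""
--     result: List[str] = []
--     for raw in text.split('\n'):
--         if len(result) == 20:
--             break
--         line = raw.strip()
--         if (2 <= len(line) <= 100
--                 and any(c.isalpha() for c in line)
--                 and len(line.split()) <= 6
--                 and all(line.lower() != r.lower() for r in result)):
--             result.append(line)
--     return result
-- ===== Notes on version B (the rewrite author's own statement) =====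
-- stated objective: alternative
-- what changed: B drops A's intermediate names list and its hash set entirely: one pass collects directly into the bounded result, dedup is a case-insensitive linear scan of the (at most 20) already-collected names, the alphanumeric filter becomes a positive any(isalpha) test, and the loop stops as soon as 20 names are found instead of slicing afterwards.
import Mathlib
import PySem

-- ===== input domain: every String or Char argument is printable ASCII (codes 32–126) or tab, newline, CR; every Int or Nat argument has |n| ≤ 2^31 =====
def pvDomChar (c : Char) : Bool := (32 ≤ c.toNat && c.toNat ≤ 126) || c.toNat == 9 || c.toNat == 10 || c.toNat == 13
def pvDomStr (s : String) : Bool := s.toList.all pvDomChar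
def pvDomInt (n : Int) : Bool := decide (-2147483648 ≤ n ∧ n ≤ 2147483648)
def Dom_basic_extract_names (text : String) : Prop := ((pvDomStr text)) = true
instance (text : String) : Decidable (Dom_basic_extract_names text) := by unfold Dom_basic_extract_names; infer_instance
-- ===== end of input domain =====

-- B replaces A's intermediate list + hash set + final slice by a single pass that
-- collects straight into the capped result, dedups by a case-insensitive scan of the
-- (at most 20) collected names, and stops once 20 are found (objective: alternative).

-- ===== PORT A =====
def basic_extract_names (text : String) : List String :=
  if text = "" then []
  else
    let lines := PySem.Chars.splitOn text.toList ['\n']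
    let names := lines.foldl (fun names line =>
      let line := PySem.Chars.strip line
      if line.length < 2 || line.length > 100 then names
      else if line.all (fun c =>
        PySem.Chars.isdigit c || PySem.Chars.isspace c || !(PySem.Chars.isalnum c)) then names
      else if (PySem.Chars.split₀ line).length > 6 then names
      else names ++ [line]) []
    let p := names.foldl (fun (p : PySem.Set (List Char) × List (List Char)) name =>
      if !(PySem.Set.contains p.1 (PySem.Chars.lower name)) then
        (PySem.Set.add p.1 (PySem.Chars.lower name), p.2 ++ [name])
      else p) (PySem.Set.empty, [])
    (PySem.List.slice p.2 none (some 20)).map (fun cs => String.ofList cs)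

-- ===== PORT B =====
def pvAltKeep (line : List Char) : Bool :=
  decide (2 ≤ line.length) && decide (line.length ≤ 100)
    && line.any PySem.Chars.isalpha
    && decide ((PySem.Chars.split₀ line).length ≤ 6)

def pvAltGo : List (List Char) → List (List Char) → List (List Char)
  | [], res => res
  | raw :: rest, res =>
    if res.length = 20 then res
    else
      let line := PySem.Chars.strip raw
      if pvAltKeep line
          && res.all (fun r => !(PySem.Chars.lower line == PySem.Chars.lower r)) then
        pvAltGo rest (res ++ [line])
      else pvAltGo rest res

def basic_extract_names_alt (text : String) : List String :=
  (pvAltGo (PySem.Chars.splitOn text.toList ['\n']) []).map (fun cs => String.ofList cs)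

-- ===== PRECONDITION & SPEC =====
def Spec_basic_extract_names (text : String) (out : List String) : Prop := out = basic_extract_names_alt text
instance (text : String) (out : List String) : Decidable (Spec_basic_extract_names text out) := by unfold Spec_basic_extract_names; infer_instance

-- ===== CLAIM (what is proved, stated in full; the proofs are below) =====
def Claim_equal_basic_extract_names : Prop := ∀ (text : String), Dom_basic_extract_names text → Spec_basic_extract_names text (basic_extract_names text)

-- ===== LEMMAS AND PROOFS =====

-- A's second loop (dedup), as a structural recursion on the remaining names.
def pvDedup : List (List Char) → PySem.Set (List Char) → List (List Char) → List (List Char)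
  | [], _, u => u
  | n :: ns, seen, u =>
    if PySem.Chars.lower n ∈ seen then pvDedup ns seen u
    else pvDedup ns (PySem.Set.add seen (PySem.Chars.lower n)) (u ++ [n])

-- A's per-character skip test is the pointwise negation of isalpha.
lemma pvChar_eq (c : Char) :
    (PySem.Chars.isalnum c && !(PySem.Chars.isdigit c) && !(PySem.Chars.isspace c))
      = PySem.Chars.isalpha c := by
  unfold PySem.Chars.isalnum PySem.Chars.isdigit PySem.Chars.isspace PySem.Chars.isalpha
    PySem.Chars.isupper PySem.Chars.islower
  simp only [Char.le_def, ← Bool.decide_and, ← Bool.decide_or]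
  simp only [← decide_not, ← Bool.decide_and, decide_eq_decide, Char.toNat,
    UInt32.le_iff_toNat_le]
  simp only [show ('A'.val.toNat)=65 from rfl, show ('Z'.val.toNat)=90 from rfl,
    show ('a'.val.toNat)=97 from rfl, show ('z'.val.toNat)=122 from rfl,
    show ('0'.val.toNat)=48 from rfl, show ('9'.val.toNat)=57 from rfl]
  omega

-- B's keep test equals the conjunction of the negations of A's three skip tests.
lemma pvKeep_eq (s : List Char) :
    pvAltKeep s =
      (!(decide (s.length < 2) || decide (s.length > 100))
        && !(s.all fun c =>
          PySem.Chars.isdigit c || PySem.Chars.isspace c || !(PySem.Chars.isalnum c))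
        && !(decide ((PySem.Chars.split₀ s).length > 6))) := by
  unfold pvAltKeep
  have hany : s.any PySem.Chars.isalpha
      = !(s.all fun c =>
          PySem.Chars.isdigit c || PySem.Chars.isspace c || !(PySem.Chars.isalnum c)) := by
    rw [List.any_eq_not_all_not]
    congr 2
    funext c
    rw [← pvChar_eq c]
    cases h1 : PySem.Chars.isalnum c <;> cases h2 : PySem.Chars.isdigit c <;>
      cases h3 : PySem.Chars.isspace c <;> simp_all
  rw [hany]
  have e1 : decide (s.length < 2) = !decide (2 ≤ s.length) := by
    rcases Nat.lt_or_ge s.length 2 with h | h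
    · simp [h, Nat.not_le.mpr h]
    · simp [h, Nat.not_lt.mpr h]
  have e2 : decide (s.length > 100) = !decide (s.length ≤ 100) := by
    rcases Nat.lt_or_ge 100 s.length with h | h
    · simp [h, Nat.not_le.mpr h]
    · simp [h, Nat.not_lt.mpr h]
  have e3 : decide ((PySem.Chars.split₀ s).length > 6)
      = !decide ((PySem.Chars.split₀ s).length ≤ 6) := by
    rcases Nat.lt_or_ge 6 (PySem.Chars.split₀ s).length with h | h
    · simp [h, Nat.not_le.mpr h]
    · simp [h, Nat.not_lt.mpr h]
  rw [e1, e2, e3]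
  simp [Bool.not_or, Bool.not_not, Bool.and_assoc]

-- A's filter pass equals List.filter pvAltKeep over the stripped lines.
lemma pvFoldA_eq (lines : List (List Char)) (acc : List (List Char)) :
    lines.foldl (fun names line =>
      let line := PySem.Chars.strip line
      if line.length < 2 || line.length > 100 then names
      else if line.all (fun c =>
        PySem.Chars.isdigit c || PySem.Chars.isspace c || !(PySem.Chars.isalnum c)) then names
      else if (PySem.Chars.split₀ line).length > 6 then names
      else names ++ [line]) acc
    = acc ++ (lines.map PySem.Chars.strip).filter pvAltKeep := by
  induction lines generalizing acc with
  | nil => simp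
  | cons raw rest ih =>
    simp only [List.foldl_cons, List.map_cons, List.filter_cons, pvKeep_eq]
    rw [ih]
    cases hc1 : (decide ((PySem.Chars.strip raw).length < 2)
        || decide ((PySem.Chars.strip raw).length > 100)) <;>
    cases hc2 : ((PySem.Chars.strip raw).all fun c =>
        PySem.Chars.isdigit c || PySem.Chars.isspace c || !(PySem.Chars.isalnum c)) <;>
    cases hc3 : decide ((PySem.Chars.split₀ (PySem.Chars.strip raw)).length > 6) <;>
      simp <;>
      first
        | (simpa using hc3)
        | (rw [if_neg (show ¬ 6 < (PySem.Chars.split₀ (PySem.Chars.strip raw)).length by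
            simpa using hc3)]; simp)

-- A's dedup foldl equals pvDedup (second component of the pair state).
lemma pvFoldD_eq (names : List (List Char)) (seen : PySem.Set (List Char))
    (u : List (List Char)) :
    (names.foldl (fun (p : PySem.Set (List Char) × List (List Char)) name =>
      if !(PySem.Set.contains p.1 (PySem.Chars.lower name)) then
        (PySem.Set.add p.1 (PySem.Chars.lower name), p.2 ++ [name])
      else p) (seen, u)).2 = pvDedup names seen u := by
  induction names generalizing seen u with
  | nil => simp [pvDedup]
  | cons n ns ih =>
    simp only [List.foldl_cons, pvDedup]
    by_cases h : PySem.Chars.lower n ∈ seen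
    · rw [if_neg (show ¬(!PySem.Set.contains seen (PySem.Chars.lower n)) = true from by
          simpa using h), if_pos h]
      exact ih seen u
    · rw [if_pos (show (!PySem.Set.contains seen (PySem.Chars.lower n)) = true from by
          simpa using h), if_neg h]
      exact ih _ _

-- pvDedup only appends to its accumulator.
lemma pvDedup_append (names : List (List Char)) (seen : PySem.Set (List Char))
    (u : List (List Char)) :
    pvDedup names seen u = u ++ pvDedup names seen [] := by
  induction names generalizing seen u with
  | nil => simp [pvDedup]
  | cons n ns ih =>
    simp only [pvDedup]
    by_cases h : PySem.Chars.lower n ∈ seen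
    · rw [if_pos h, if_pos h, ih]
    · rw [if_neg h, if_neg h,
        ih (seen.add (PySem.Chars.lower n)) (u ++ [n]),
        ih (seen.add (PySem.Chars.lower n)) ([] ++ [n])]
      simp

-- B's fused loop equals take 20 of A's filter-then-dedup pipeline, under the invariant
-- that the seen set holds exactly the lowercased collected names.
lemma pvAltGo_eq (lines : List (List Char)) (seen : PySem.Set (List Char))
    (res : List (List Char)) (hu : res.length ≤ 20)
    (hinv : ∀ l, l ∈ seen ↔ l ∈ res.map PySem.Chars.lower) :
    pvAltGo lines res =
      List.take 20 (pvDedup ((lines.map PySem.Chars.strip).filter pvAltKeep) seen res) := by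
  induction lines generalizing seen res with
  | nil => simp [pvAltGo, pvDedup, List.take_of_length_le hu]
  | cons raw rest ih =>
    simp only [pvAltGo, List.map_cons, List.filter_cons]
    by_cases hcap : res.length = 20
    · rw [if_pos hcap, pvDedup_append, ← hcap, List.take_left]
    · rw [if_neg hcap]
      by_cases hk : pvAltKeep (PySem.Chars.strip raw)
      · simp only [hk, Bool.true_and, ite_true, pvDedup]
        by_cases hc : PySem.Chars.lower (PySem.Chars.strip raw)
            ∈ res.map PySem.Chars.lower
        · have hscan : (res.all fun r =>
              !(PySem.Chars.lower (PySem.Chars.strip raw) == PySem.Chars.lower r)) = false := by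
            obtain ⟨r, hr, he⟩ := List.mem_map.mp hc
            rw [List.all_eq_false]
            exact ⟨r, hr, by simp [he]⟩
          rw [hscan, if_neg (by simp)]
          rw [if_pos ((hinv _).mpr hc)]
          exact ih seen res hu hinv
        · have hscan : (res.all fun r =>
              !(PySem.Chars.lower (PySem.Chars.strip raw) == PySem.Chars.lower r)) = true := by
            simp only [List.all_eq_true]
            intro r hr
            simp only [Bool.not_eq_eq_eq_not, Bool.not_true, beq_eq_false_iff_ne, ne_eq]
            intro he
            exact hc (List.mem_map.mpr ⟨r, hr, he.symm⟩)
          rw [hscan, if_pos (by simp), if_neg (fun h => hc ((hinv _).mp h))]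
          refine ih _ _ (by simp; omega) ?_
          intro l
          simp only [PySem.Set.mem_add, List.map_append, List.mem_append, List.map_cons,
            List.map_nil, List.mem_singleton, hinv l]
      · simp only [hk, Bool.false_and, ite_false, Bool.false_eq_true]
        exact ih seen res hu hinv

-- ===== VERDICT (by name: the statement is the Claim_ definition above) =====
theorem basic_extract_names_spec : Claim_equal_basic_extract_names := by
  intro text _
  show basic_extract_names text = basic_extract_names_alt text
  by_cases h : text = ""
  · subst h; decide
  · simp only [basic_extract_names, basic_extract_names_alt, if_neg h]
    rw [pvFoldA_eq, pvFoldD_eq, pvAltGo_eq _ PySem.Set.empty [] (by simp)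
        (by intro l; simp [PySem.Set.empty])]
    rw [PySem.List.slice_to _ (by norm_num)]
    rfl
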